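-- pv_equiv track=rewrite | github.com/gesen2egee/yt | yt.py | _batch_counts
-- ===== SOURCE A (Python) =====
-- from typing import Optional, List, Dict, Any, Tuple, Set
--
-- def _batch_counts(items: List[Dict[str, Any]]) -> Dict[str, int]:
--     return {
--         "total": len(items),
--         "pending": sum(1 for i in items if i.get("status") == "pending"),
--         "extracting": sum(1 for i in items if i.get("status") == "extracting"),
--         "summarizing": sum(1 for i in items if i.get("status") == "summarizing"),
--         "completed": sum(1 for i in items if i.get("status") == "completed"),
--         "error": sum(1 for i in items if i.get("status") == "error"),
--     }
-- ===== SOURCE B (Python) =====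
-- from typing import Optional, List, Dict, Any, Tuple, Set
--
-- def _batch_counts(items: List[Dict[str, Any]]) -> Dict[str, int]:
--     counts: Dict[Any, int] = {}
--     for i in items:
--         s = i.get("status")
--         counts[s] = counts.get(s, 0) + 1
--     return {
--         "total": len(items),
--         "pending": counts.get("pending", 0),
--         "extracting": counts.get("extracting", 0),
--         "summarizing": counts.get("summarizing", 0),
--         "completed": counts.get("completed", 0),
--         "error": counts.get("error", 0),
--     }
-- ===== Notes on version B (the rewrite author's own statement) =====
-- stated objective: idiomatic
-- what changed: Replaced five separate generator scans over items (one per status) by a single accumulation pass building a tally dict keyed by status, from which the five counts are read with default 0.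
import Mathlib
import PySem

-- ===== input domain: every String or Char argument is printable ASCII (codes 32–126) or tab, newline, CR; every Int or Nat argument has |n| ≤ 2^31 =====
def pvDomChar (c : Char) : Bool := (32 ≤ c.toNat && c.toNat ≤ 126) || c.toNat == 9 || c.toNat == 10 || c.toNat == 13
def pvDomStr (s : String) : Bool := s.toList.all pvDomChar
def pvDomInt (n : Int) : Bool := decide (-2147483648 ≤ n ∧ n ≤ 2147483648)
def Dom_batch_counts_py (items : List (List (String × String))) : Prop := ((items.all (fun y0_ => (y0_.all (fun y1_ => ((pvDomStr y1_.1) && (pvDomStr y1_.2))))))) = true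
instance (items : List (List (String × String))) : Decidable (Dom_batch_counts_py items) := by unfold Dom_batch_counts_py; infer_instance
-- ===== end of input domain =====

-- B replaces A's five per-status scans with one tally pass over items; objective: idiomatic.

-- ===== PORT A =====
-- sum(1 for i in items if i.get("status") == s)
def pvScanCount (items : List (List (String × String))) (s : String) : Int :=
  items.foldl (fun acc i => if (PySem.Dict.get? ⟨i⟩ "status") = some s then acc + 1 else acc) 0

def batch_counts_py (items : List (List (String × String))) : List (String × Int) :=
  [("total", (items.length : Int)),
   ("pending", pvScanCount items "pending"),
   ("extracting", pvScanCount items "extracting"),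
   ("summarizing", pvScanCount items "summarizing"),
   ("completed", pvScanCount items "completed"),
   ("error", pvScanCount items "error")]

-- ===== PORT B =====
-- one pass: counts[s] = counts.get(s, 0) + 1 for each item's status
def pvTallyStep (d : PySem.Dict (Option String) Int) (s : Option String) : PySem.Dict (Option String) Int :=
  d.insert s (d.getD s 0 + 1)

def pvTally (items : List (List (String × String))) : PySem.Dict (Option String) Int :=
  items.foldl (fun d i =>
    pvTallyStep d (PySem.Dict.get? (⟨i⟩ : PySem.Dict String String) "status")) PySem.Dict.empty

def batch_counts_py_alt (items : List (List (String × String))) : List (String × Int) :=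
  let counts := pvTally items
  [("total", (items.length : Int)),
   ("pending", counts.getD (some "pending") 0),
   ("extracting", counts.getD (some "extracting") 0),
   ("summarizing", counts.getD (some "summarizing") 0),
   ("completed", counts.getD (some "completed") 0),
   ("error", counts.getD (some "error") 0)]

-- ===== PRECONDITION & SPEC =====
def Spec_batch_counts_py (items : List (List (String × String))) (out : List (String × Int)) : Prop := out = batch_counts_py_alt items
instance (items : List (List (String × String))) (out : List (String × Int)) : Decidable (Spec_batch_counts_py items out) := by unfold Spec_batch_counts_py; infer_instance

-- ===== CLAIM (what is proved, stated in full; the proofs are below) =====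
def Claim_equal_batch_counts_py : Prop := ∀ (items : List (List (String × String))), Dom_batch_counts_py items → Spec_batch_counts_py items (batch_counts_py items)

-- ===== LEMMAS AND PROOFS =====

-- A's per-status scan counts exactly the occurrences of that status among the mapped statuses.
theorem pvScanCount_eq_count (items : List (List (String × String))) (s : String) :
    pvScanCount items s
      = ((items.map (fun i => PySem.Dict.get? (⟨i⟩ : PySem.Dict String String) "status")).count (some s) : Int) := by
  unfold pvScanCount
  induction items using List.reverseRecOn with
  | nil => simp
  | append_singleton xs x ih =>
    simp [List.foldl_append, List.map_append, List.count_append, ih, List.count_cons]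
    split_ifs with h <;> simp

-- B's tally read at a status equals that same count.
theorem pvTally_getD (items : List (List (String × String))) (s : String) :
    (pvTally items).getD (some s) 0
      = ((items.map (fun i => PySem.Dict.get? (⟨i⟩ : PySem.Dict String String) "status")).count (some s) : Int) := by
  unfold pvTally
  rw [show items.foldl (fun d i =>
        pvTallyStep d (PySem.Dict.get? (⟨i⟩ : PySem.Dict String String) "status")) PySem.Dict.empty
      = (items.map (fun i => PySem.Dict.get? (⟨i⟩ : PySem.Dict String String) "status")).foldl
          pvTallyStep PySem.Dict.empty
      from (List.foldl_map ..).symm]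
  unfold pvTallyStep
  rw [PySem.Dict.getD_foldl_insert_add_one]
  simp [PySem.Dict.getD_empty]

-- ===== VERDICT (by name: the statement is the Claim_ definition above) =====
theorem batch_counts_py_spec : Claim_equal_batch_counts_py := by
  intro items _
  unfold Spec_batch_counts_py batch_counts_py batch_counts_py_alt
  simp only [pvScanCount_eq_count, pvTally_getD]
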